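-- pv_equiv track=rewrite | github.com/breivens/scriptingtalen | additional exercise series/series_10 [Python]/M/Mangarevan counting.py | to_mangarevan
-- ===== SOURCE A (Python) =====
-- def to_mangarevan(integer: int):
--     factors = list()
--     for i in range(3, -1, -1):
--         num = 10 * 2 ** i
--         a = integer // num
--         integer -= a * num
--         factors.append(a)
--     return "".join([f"{factor}V" if i == 0 and factor != 0 else factor * 'VTPK'[i]
--                     for i, factor in enumerate(factors)]) + ("" if integer == 0 else str(integer))
-- ===== SOURCE B (Python) =====
-- def to_mangarevan(integer: int):
--     eighties, r = divmod(integer, 80)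
--     q, units = divmod(r, 10)
--     parts = []
--     if eighties:
--         parts.append(f"{eighties}V")
--     if q & 4:
--         parts.append('T')
--     if q & 2:
--         parts.append('P')
--     if q & 1:
--         parts.append('K')
--     if units:
--         parts.append(str(units))
--     return ''.join(parts)
-- ===== Notes on version B (the rewrite author's own statement) =====
-- stated objective: simpler
-- what changed: Replaces the four-step successive floor-division loop and enumerate-indexed comprehension by a single divmod for the signed eighties prefix, a second divmod for the tens digit and units, and bit tests on the tens digit for the T/P/K letters.
import Mathlib
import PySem

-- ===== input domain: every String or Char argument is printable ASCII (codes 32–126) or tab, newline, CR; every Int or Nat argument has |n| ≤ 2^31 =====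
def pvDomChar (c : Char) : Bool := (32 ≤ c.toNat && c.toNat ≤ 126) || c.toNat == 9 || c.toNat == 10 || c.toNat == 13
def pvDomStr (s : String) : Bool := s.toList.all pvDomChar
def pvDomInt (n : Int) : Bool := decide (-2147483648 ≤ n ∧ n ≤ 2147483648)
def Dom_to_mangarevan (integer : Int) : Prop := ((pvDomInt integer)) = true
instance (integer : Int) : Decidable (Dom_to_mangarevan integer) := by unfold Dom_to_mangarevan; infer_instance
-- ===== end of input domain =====

-- B replaces A's four-iteration successive-division loop and comprehension by a single
-- divmod by 80 plus a divmod by 10 and bit tests on the tens digit (objective: simpler decomposition).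


-- ===== PORT A =====
-- literal port of A's loop 'for i in range(3, -1, -1)'; '2 ** i' is ported as
-- '2 ^ i.toNat' (exact here: the range only yields i ∈ {3,2,1,0}, all nonnegative);
-- 'VTPK'[i] is PySem.Str.pyGet?; the '.getD' default is unreachable (enumerate
-- indices are 0..3, in range for the 4-char string, so Python never raises).
def to_mangarevan (integer : Int) : String :=
  let st := (PySem.List.pyRange 3 (-1) (-1)).foldl
    (fun (st : Int × List Int) i =>
      let num : Int := 10 * 2 ^ i.toNat
      let a := PySem.Int.floordiv st.1 num
      (st.1 - a * num, st.2 ++ [a]))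
    (integer, [])
  PySem.Str.join ""
    ((PySem.List.enumerate st.2 0).map (fun p =>
      if p.1 = 0 ∧ p.2 ≠ 0 then PySem.Int.toStr p.2 ++ "V"
      else String.ofList (PySem.List.pyRepeat [(PySem.Str.pyGet? "VTPK" p.1).getD ' '] p.2)))
  ++ (if st.1 = 0 then "" else PySem.Int.toStr st.1)

-- ===== PORT B =====
-- literal port of Source B: divmod(integer, 80), divmod(r, 10), then bit tests q&4 / q&2 / q&1
def to_mangarevan_alt (integer : Int) : String :=
  let eighties := PySem.Int.floordiv integer 80
  let r := PySem.Int.mod integer 80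
  let q := PySem.Int.floordiv r 10
  let units := PySem.Int.mod r 10
  let parts : List String :=
    (if eighties ≠ 0 then [PySem.Int.toStr eighties ++ "V"] else [])
    ++ (if Int.land q 4 ≠ 0 then ["T"] else [])
    ++ (if Int.land q 2 ≠ 0 then ["P"] else [])
    ++ (if Int.land q 1 ≠ 0 then ["K"] else [])
    ++ (if units ≠ 0 then [PySem.Int.toStr units] else [])
  PySem.Str.join "" parts

-- ===== PRECONDITION & SPEC =====
def Spec_to_mangarevan (integer : Int) (out : String) : Prop := out = to_mangarevan_alt integer
instance (integer : Int) (out : String) : Decidable (Spec_to_mangarevan integer out) := by unfold Spec_to_mangarevan; infer_instance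

-- ===== CLAIM (what is proved, stated in full; the proofs are below) =====
def Claim_equal_to_mangarevan : Prop := ∀ (integer : Int), Dom_to_mangarevan integer → Spec_to_mangarevan integer (to_mangarevan integer)

-- ===== LEMMAS AND PROOFS =====

-- both outputs, as char lists, share the shape prefix ++ middle ++ tail ('/'/'%' below are Int.ediv/emod)
def pvPref (e : Int) : List Char :=
  if e = 0 then [] else PySem.Int.toChars e ++ ['V']

def pvTail (u : Int) : List Char :=
  if u = 0 then [] else PySem.Int.toChars u

def pvMidA (r : Int) : List Char :=
  List.replicate (r / 40).toNat 'T'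
  ++ List.replicate (r % 40 / 20).toNat 'P'
  ++ List.replicate (r % 40 % 20 / 10).toNat 'K'

def pvMidB (q : Int) : List Char :=
  (if Int.land q 4 ≠ 0 then ['T'] else [])
  ++ (if Int.land q 2 ≠ 0 then ['P'] else [])
  ++ (if Int.land q 1 ≠ 0 then ['K'] else [])

theorem pv_pyr : PySem.List.pyRange 3 (-1) (-1) = [3, 2, 1, 0] := by decide

-- the join/enumerate part of A's output, on explicit factors, as char lists
theorem pv_join4 (a b c d rem : Int) :
    (PySem.Str.join ""
      ((PySem.List.enumerate [a, b, c, d] 0).map (fun p =>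
        if p.1 = 0 ∧ p.2 ≠ 0 then PySem.Int.toStr p.2 ++ "V"
        else String.ofList (PySem.List.pyRepeat [(PySem.Str.pyGet? "VTPK" p.1).getD ' '] p.2)))
      ++ (if rem = 0 then "" else PySem.Int.toStr rem)).toList
    = (if a = 0 then [] else PySem.Int.toChars a ++ ['V'])
      ++ List.replicate b.toNat 'T' ++ List.replicate c.toNat 'P' ++ List.replicate d.toNat 'K'
      ++ (if rem = 0 then [] else PySem.Int.toChars rem) := by
  by_cases ha : a = 0 <;> by_cases hrem : rem = 0 <;>
    simp [ha, hrem, PySem.List.enumerate, PySem.Str.toList_join, PySem.Chars.join,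
      List.intercalate, PySem.List.pyRepeat_singleton, PySem.Int.toList_toStr,
      PySem.Str.pyGet?]

theorem pv_A_decomp (e r : Int) (h0 : 0 ≤ r) (h80 : r < 80) :
    (to_mangarevan (e * 80 + r)).toList = pvPref e ++ pvMidA r ++ pvTail (r % 10) := by
  unfold to_mangarevan
  rw [pv_pyr]
  simp only [List.foldl, List.nil_append, List.cons_append]
  rw [show ((10:Int) * 2 ^ Int.toNat 3) = 80 by decide,
      show ((10:Int) * 2 ^ Int.toNat 2) = 40 by decide,
      show ((10:Int) * 2 ^ Int.toNat 1) = 20 by decide,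
      show ((10:Int) * 2 ^ Int.toNat 0) = 10 by decide]
  simp only [PySem.Int.floordiv_eq_ediv_of_pos (show (0:Int) < 80 by norm_num),
             PySem.Int.floordiv_eq_ediv_of_pos (show (0:Int) < 40 by norm_num),
             PySem.Int.floordiv_eq_ediv_of_pos (show (0:Int) < 20 by norm_num),
             PySem.Int.floordiv_eq_ediv_of_pos (show (0:Int) < 10 by norm_num)]
  rw [pv_join4]
  rw [show (e * 80 + r) / 80 = e by omega]
  rw [show e * 80 + r - e * 80 = r by ring]
  rw [show r - r / 40 * 40 = r % 40 by omega]
  rw [show r % 40 - r % 40 / 20 * 20 = r % 40 % 20 by omega]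
  rw [show r % 40 % 20 - r % 40 % 20 / 10 * 10 = r % 40 % 20 % 10 by omega]
  rw [show r % 40 % 20 % 10 = r % 10 by omega]
  simp [pvPref, pvMidA, pvTail, List.append_assoc]

theorem pv_B_decomp (e r : Int) (h0 : 0 ≤ r) (h80 : r < 80) :
    (to_mangarevan_alt (e * 80 + r)).toList = pvPref e ++ pvMidB (r / 10) ++ pvTail (r % 10) := by
  unfold to_mangarevan_alt
  simp only [PySem.Int.floordiv_eq_ediv_of_pos (show (0:Int) < 80 by norm_num),
             PySem.Int.floordiv_eq_ediv_of_pos (show (0:Int) < 10 by norm_num),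
             PySem.Int.mod_eq_emod_of_pos (show (0:Int) < 80 by norm_num),
             PySem.Int.mod_eq_emod_of_pos (show (0:Int) < 10 by norm_num)]
  rw [show (e * 80 + r) / 80 = e by omega, show (e * 80 + r) % 80 = r by omega]
  by_cases he : e = 0 <;> by_cases hu : r % 10 = 0 <;>
    by_cases h4 : Int.land (r / 10) 4 = 0 <;> by_cases h2 : Int.land (r / 10) 2 = 0 <;>
    by_cases h1 : Int.land (r / 10) 1 = 0 <;>
    simp [he, hu, h4, h2, h1, pvPref, pvMidB, pvTail, PySem.Str.toList_join,
          PySem.Chars.join, List.intercalate, PySem.Int.toList_toStr]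

theorem pv_mid_eq (r : Int) (h0 : 0 ≤ r) (h80 : r < 80) :
    pvMidA r = pvMidB (r / 10) := by
  interval_cases r <;> decide

-- ===== VERDICT (by name: the statement is the Claim_ definition above) =====
theorem to_mangarevan_spec : Claim_equal_to_mangarevan := by
  intro integer _
  unfold Spec_to_mangarevan
  have h0 : 0 ≤ integer % 80 := by omega
  have h80 : integer % 80 < 80 := by omega
  have hi : integer = (integer / 80) * 80 + integer % 80 := by omega
  rw [← String.toList_inj, hi,
      pv_A_decomp _ _ h0 h80, pv_B_decomp _ _ h0 h80, pv_mid_eq _ h0 h80]
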